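-- pv_equiv track=rewrite | github.com/proteanstudios/aitherhub | worker/batch/video_frames.py | apply_max_phase
-- ===== SOURCE A (Python) =====
-- def apply_max_phase(indices, total_frames, max_len=150):
--     result = []
--     extended = [0] + indices + [total_frames - 1]
--
--     for i in range(1, len(extended) - 1):
--         start = extended[i - 1]
--         end = extended[i]
--         length = end - start
--
--         if length > max_len:
--             mid = (start + end) // 2
--             result.append(mid)
--
--         result.append(end)
--
--     return sorted(list(set(result)))
-- ===== SOURCE B (Python) =====
-- def apply_max_phase(indices, total_frames, max_len=150):
--     # Single pass with ordered duplicate-free insertion (binary search for the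
--     # slot): no final sort, no set ever built.
--     out = []
--
--     def add(v):
--         lo, hi = 0, len(out)
--         while lo < hi:
--             mid = (lo + hi) // 2
--             if out[mid] < v:
--                 lo = mid + 1
--             else:
--                 hi = mid
--         if lo == len(out) or out[lo] != v:
--             out.insert(lo, v)
--
--     prev = 0
--     for b in indices:
--         if b - prev > max_len:
--             add((prev + b) // 2)
--         add(b)
--         prev = b
--     return out
-- ===== Notes on version B (the rewrite author's own statement) =====
-- stated objective: alternative
-- what changed: Replaces A's collect-then-sorted(set(...)) pipeline (index loop over the padded list, then dedup and sort at the end) with a single pass over indices that maintains the answer as an always-sorted duplicate-free list, inserting each value at the slot found by a hand-written binary search, so no sort and no set are ever built; total_frames drops out because A's loop never reaches the trailing pair.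
import Mathlib
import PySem

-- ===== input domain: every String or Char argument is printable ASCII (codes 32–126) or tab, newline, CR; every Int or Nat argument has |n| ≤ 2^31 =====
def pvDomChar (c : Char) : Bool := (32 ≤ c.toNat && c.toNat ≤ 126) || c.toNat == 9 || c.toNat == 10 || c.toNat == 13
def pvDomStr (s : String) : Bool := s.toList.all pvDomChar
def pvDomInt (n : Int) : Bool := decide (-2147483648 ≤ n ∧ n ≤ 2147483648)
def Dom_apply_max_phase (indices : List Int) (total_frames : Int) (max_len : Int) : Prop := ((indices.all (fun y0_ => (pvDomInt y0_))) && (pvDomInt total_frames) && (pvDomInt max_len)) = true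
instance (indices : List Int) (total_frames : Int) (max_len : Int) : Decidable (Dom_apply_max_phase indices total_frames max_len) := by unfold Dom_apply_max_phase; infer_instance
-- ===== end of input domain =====

-- B replaces A's collect-then-sorted(set(...)) pipeline with a single pass over indices
-- that keeps the answer as an always-sorted duplicate-free list via ordered insertion
-- (no sort, no set) — objective: alternative.

-- ===== PORT A =====
-- loop indices i run over 1 .. len(extended)-2, always in range, so extended[i-1]/extended[i] are pyGetD
def apply_max_phase (indices : List Int) (total_frames : Int) (max_len : Int) : List Int :=
  let extended : List Int := [0] ++ indices ++ [total_frames - 1]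
  let result : List Int :=
    (PySem.List.pyRange 1 ((extended.length : Int) - 1) 1).foldl (fun result i =>
      let start := PySem.List.pyGetD extended (i - 1) 0
      let «end» := PySem.List.pyGetD extended i 0
      let length := «end» - start
      let result := if length > max_len then result ++ [PySem.Int.floordiv (start + «end») 2] else result
      result ++ [«end»]) []
  PySem.List.sorted (PySem.Set.ofList result) (fun x => x) false

-- ===== PORT B =====
-- Source B's `add`: binary search (lo,hi) for the slot, then insert v unless already present.
-- out[mid] is always in range (0 ≤ lo ≤ mid < hi ≤ len out), ported as List.getD
def pvFindSlot (out : List Int) (v : Int) (lo hi : Nat) : Nat :=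
  if lo < hi then
    let mid := (lo + hi) / 2
    if out.getD mid 0 < v then pvFindSlot out v (mid + 1) hi else pvFindSlot out v lo mid
  else lo
termination_by hi - lo
decreasing_by all_goals omega

def pvAdd (v : Int) (out : List Int) : List Int :=
  let lo := pvFindSlot out v 0 out.length
  if lo = out.length ∨ out.getD lo 0 ≠ v then PySem.List.insert out (lo : Int) v else out

def apply_max_phase_alt (indices : List Int) (total_frames : Int) (max_len : Int) : List Int :=
  (indices.foldl (fun (s : Int × List Int) b =>
      let out := if b - s.1 > max_len then pvAdd (PySem.Int.floordiv (s.1 + b) 2) s.2 else s.2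
      (b, pvAdd b out)) ((0 : Int), ([] : List Int))).2

-- ===== PRECONDITION & SPEC =====
def Spec_apply_max_phase (indices : List Int) (total_frames : Int) (max_len : Int) (out : List Int) : Prop := out = apply_max_phase_alt indices total_frames max_len
instance (indices : List Int) (total_frames : Int) (max_len : Int) (out : List Int) : Decidable (Spec_apply_max_phase indices total_frames max_len out) := by unfold Spec_apply_max_phase; infer_instance

-- ===== CLAIM (what is proved, stated in full; the proofs are below) =====
def Claim_equal_apply_max_phase : Prop := ∀ (indices : List Int) (total_frames : Int) (max_len : Int), Dom_apply_max_phase indices total_frames max_len → Spec_apply_max_phase indices total_frames max_len (apply_max_phase indices total_frames max_len)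

-- ===== LEMMAS AND PROOFS =====

-- the values A's loop emits, written as a recursion over (previous index, remaining indices)
def pvContrib (max_len prev : Int) : List Int → List Int
  | [] => []
  | b :: rest => (if b - prev > max_len then [PySem.Int.floordiv (prev + b) 2] else []) ++ b :: pvContrib max_len b rest

-- the pairs A's loop reads from `extended` are exactly zip([0]+indices, indices)
theorem pv_pairs_eq (indices : List Int) (t : Int) :
    (PySem.List.pyRange 1 ((((([0] : List Int) ++ indices ++ [t]).length : Int)) - 1) 1).map
      (fun i => (PySem.List.pyGetD ([0] ++ indices ++ [t]) (i - 1) 0,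
                 PySem.List.pyGetD ([0] ++ indices ++ [t]) i 0))
      = ([0] ++ indices).zip indices := by
  apply List.ext_getElem
  · simp [PySem.List.length_pyRange_one]
  · intro k h1 h2
    have hk : k < indices.length := by
      simp [PySem.List.length_pyRange_one] at h1; omega
    rw [List.getElem_map, PySem.List.getElem_pyRange_one, List.getElem_zip]
    have e1 : (1 : Int) + (k : Int) - 1 = ((k : Nat) : Int) := by omega
    have e2 : (1 : Int) + (k : Int) = (((k+1 : Nat)) : Int) := by omega
    rw [e1, e2, PySem.List.pyGetD_natCast, PySem.List.pyGetD_natCast]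
    have h3 : (([0] : List Int) ++ indices ++ [t]).getD k 0 = ([0] ++ indices)[k]'(by simp; omega) := by
      rw [List.getD_eq_getElem _ _ (by simp; omega)]
      rw [List.getElem_append_left (by simp; omega)]
    have h4 : (([0] : List Int) ++ indices ++ [t]).getD (k+1) 0 = indices[k]'hk := by
      rw [List.getD_eq_getElem _ _ (by simp; omega)]
      rw [List.getElem_append_left (by simp; omega)]
      simp
    rw [h3, h4]

-- flatMap over adjacent pairs is pvContrib
theorem pv_flatMap_contrib (max_len : Int) (l : List Int) (prev : Int) :
    ((prev :: l).zip l).flatMap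
        (fun p : Int × Int => (if p.2 - p.1 > max_len then [PySem.Int.floordiv (p.1 + p.2) 2] else []) ++ [p.2])
      = pvContrib max_len prev l := by
  induction l generalizing prev with
  | nil => simp [pvContrib]
  | cons b rest ih =>
    simp only [List.zip_cons_cons, List.flatMap_cons, pvContrib, ih]
    simp

-- A's loop result is exactly pvContrib max_len 0 indices
theorem pv_A_loop_eq (indices : List Int) (t max_len : Int) :
    (PySem.List.pyRange 1 ((((([0] : List Int) ++ indices ++ [t]).length : Int)) - 1) 1).foldl
        (fun result i =>
          let start := PySem.List.pyGetD ([0] ++ indices ++ [t]) (i - 1) 0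
          let «end» := PySem.List.pyGetD ([0] ++ indices ++ [t]) i 0
          let length := «end» - start
          let result := if length > max_len then result ++ [PySem.Int.floordiv (start + «end») 2] else result
          result ++ [«end»]) []
      = pvContrib max_len 0 indices := by
  have hfold := PySem.List.foldl_congr_mem
      (l := PySem.List.pyRange 1 ((((([0] : List Int) ++ indices ++ [t]).length : Int)) - 1) 1)
      (init := ([] : List Int))
      (f := fun result i =>
          let start := PySem.List.pyGetD ([0] ++ indices ++ [t]) (i - 1) 0
          let «end» := PySem.List.pyGetD ([0] ++ indices ++ [t]) i 0
          let length := «end» - start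
          let result := if length > max_len then result ++ [PySem.Int.floordiv (start + «end») 2] else result
          result ++ [«end»])
      (g := fun result i =>
        result ++ ((if PySem.List.pyGetD ([0] ++ indices ++ [t]) i 0 - PySem.List.pyGetD ([0] ++ indices ++ [t]) (i - 1) 0 > max_len
            then [PySem.Int.floordiv (PySem.List.pyGetD ([0] ++ indices ++ [t]) (i - 1) 0 + PySem.List.pyGetD ([0] ++ indices ++ [t]) i 0) 2] else [])
          ++ [PySem.List.pyGetD ([0] ++ indices ++ [t]) i 0]))
      (by intro acc i _; simp only []; split_ifs <;> simp)
  rw [hfold, PySem.List.foldl_append_eq_flatMap, List.nil_append]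
  have hcomp : (PySem.List.pyRange 1 ((((([0] : List Int) ++ indices ++ [t]).length : Int)) - 1) 1).flatMap
      (fun i => (if PySem.List.pyGetD ([0] ++ indices ++ [t]) i 0 - PySem.List.pyGetD ([0] ++ indices ++ [t]) (i - 1) 0 > max_len
            then [PySem.Int.floordiv (PySem.List.pyGetD ([0] ++ indices ++ [t]) (i - 1) 0 + PySem.List.pyGetD ([0] ++ indices ++ [t]) i 0) 2] else [])
          ++ [PySem.List.pyGetD ([0] ++ indices ++ [t]) i 0])
      = (([0] ++ indices).zip indices).flatMap
          (fun p : Int × Int => (if p.2 - p.1 > max_len then [PySem.Int.floordiv (p.1 + p.2) 2] else []) ++ [p.2]) := by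
    rw [← pv_pairs_eq indices t, List.flatMap_map]
  rw [hcomp]
  exact pv_flatMap_contrib max_len indices 0

-- step equations for pvFindSlot
theorem pv_findSlot_step (out : List Int) (v : Int) (lo hi : Nat) (h : lo < hi) :
    pvFindSlot out v lo hi =
      if out.getD ((lo + hi) / 2) 0 < v then pvFindSlot out v ((lo + hi) / 2 + 1) hi
      else pvFindSlot out v lo ((lo + hi) / 2) := by
  rw [pvFindSlot]; simp [h]

theorem pv_findSlot_base (out : List Int) (v : Int) (lo hi : Nat) (h : ¬ lo < hi) :
    pvFindSlot out v lo hi = lo := by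
  rw [pvFindSlot]; simp [h]

-- binary-search spec: on a strictly sorted list the returned slot separates the
-- elements < v from those ≥ v
theorem pv_findSlot_spec (out : List Int) (v : Int) (lo hi : Nat)
    (hsorted : out.Pairwise (· < ·)) (hhi : hi ≤ out.length) (hlo : lo ≤ hi)
    (hbelow : ∀ i, i < lo → out.getD i 0 < v)
    (habove : ∀ i, hi ≤ i → i < out.length → v ≤ out.getD i 0) :
    pvFindSlot out v lo hi ≤ out.length ∧
    (∀ i, i < pvFindSlot out v lo hi → out.getD i 0 < v) ∧
    (∀ i, pvFindSlot out v lo hi ≤ i → i < out.length → v ≤ out.getD i 0) := by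
  have hmono : ∀ i j, i ≤ j → j < out.length → out.getD i 0 ≤ out.getD j 0 := by
    intro i j hij hj
    rcases Nat.eq_or_lt_of_le hij with rfl | hlt
    · exact le_refl _
    · rw [List.getD_eq_getElem _ _ (lt_trans hlt hj), List.getD_eq_getElem _ _ hj]
      exact le_of_lt (List.pairwise_iff_getElem.1 hsorted i j _ _ hlt)
  obtain ⟨n, hn⟩ : ∃ n, hi - lo ≤ n := ⟨hi - lo, le_refl _⟩
  induction n generalizing lo hi with
  | zero =>
    rw [pv_findSlot_base out v lo hi (by omega)]
    have : lo = hi := by omega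
    subst this
    exact ⟨le_trans hlo hhi, hbelow, habove⟩
  | succ n ih =>
    by_cases h : lo < hi
    · rw [pv_findSlot_step out v lo hi h]
      by_cases hm : out.getD ((lo + hi) / 2) 0 < v
      · rw [if_pos hm]
        refine ih ((lo + hi) / 2 + 1) hi hhi (by omega) ?_ habove (by omega)
        intro i hi'
        calc out.getD i 0 ≤ out.getD ((lo + hi) / 2) 0 := hmono _ _ (by omega) (by omega)
          _ < v := hm
      · rw [if_neg hm]
        refine ih lo ((lo + hi) / 2) (by omega) (by omega) hbelow ?_ (by omega)
        intro i hi' hlen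
        calc v ≤ out.getD ((lo + hi) / 2) 0 := not_lt.1 hm
          _ ≤ out.getD i 0 := hmono _ _ hi' hlen
    · rw [pv_findSlot_base out v lo hi h]
      have : lo = hi := by omega
      subst this
      exact ⟨le_trans hlo hhi, hbelow, habove⟩

-- pvAdd on a strictly sorted list: membership and sortedness
theorem pv_add_spec (v : Int) (out : List Int) (hs : out.Pairwise (· < ·)) :
    (∀ y, y ∈ pvAdd v out ↔ y = v ∨ y ∈ out) ∧ (pvAdd v out).Pairwise (· < ·) := by
  obtain ⟨hle, hbelow, habove⟩ := pv_findSlot_spec out v 0 out.length hs (le_refl _)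
    (Nat.zero_le _) (by omega) (by omega)
  set r := pvFindSlot out v 0 out.length with hr
  unfold pvAdd
  rw [← hr]
  dsimp only
  split_ifs with hc
  · -- v is inserted at slot r
    rw [PySem.List.insert_natCast out r v hle]
    have htk : ∀ a ∈ out.take r, a < v := by
      intro a ha
      rcases List.mem_iff_getElem.1 ha with ⟨i, hi, rfl⟩
      have hi' : i < r ∧ i < out.length := by simp [List.length_take] at hi; omega
      rw [List.getElem_take, ← List.getD_eq_getElem _ _ hi'.2]
      exact hbelow i hi'.1
    have hdp : ∀ b ∈ out.drop r, v < b := by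
      intro b hb
      rcases List.mem_iff_getElem.1 hb with ⟨j, hj, rfl⟩
      rw [List.getElem_drop]
      have hjl : r + j < out.length := by simp [List.length_drop] at hj; omega
      have hrlen : r < out.length := by omega
      have h1 : v ≤ out.getD (r + j) 0 := habove (r + j) (by omega) hjl
      have h2 : out.getD r 0 ≠ v := by
        rcases hc with hc | hc
        · omega
        · exact hc
      have h3 : v < out.getD r 0 := lt_of_le_of_ne (habove r (le_refl _) hrlen) (Ne.symm h2)
      have h4 : out.getD r 0 ≤ out.getD (r + j) 0 := by
        rcases Nat.eq_or_lt_of_le (Nat.le_add_right r j) with he | hlt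
        · rw [← he]
        · rw [List.getD_eq_getElem _ _ hrlen, List.getD_eq_getElem _ _ hjl]
          exact le_of_lt (List.pairwise_iff_getElem.1 hs r (r + j) _ _ hlt)
      rw [← List.getD_eq_getElem _ _ hjl]
      exact lt_of_lt_of_le h3 h4
    constructor
    · intro y
      constructor
      · intro hy
        rcases List.mem_append.1 hy with h1 | h1
        · exact Or.inr (List.mem_of_mem_take h1)
        · rcases List.mem_cons.1 h1 with rfl | h1
          · exact Or.inl rfl
          · exact Or.inr (List.mem_of_mem_drop h1)
      · intro hy
        rcases hy with rfl | hy
        · exact List.mem_append.2 (Or.inr (List.mem_cons_self))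
        · conv at hy => rw [← List.take_append_drop r out]
          rcases List.mem_append.1 hy with h1 | h1
          · exact List.mem_append.2 (Or.inl h1)
          · exact List.mem_append.2 (Or.inr (List.mem_cons.2 (Or.inr h1)))
    · rw [List.pairwise_append]
      refine ⟨hs.sublist (List.take_sublist r out), ?_, ?_⟩
      · rw [List.pairwise_cons]
        exact ⟨hdp, hs.sublist (List.drop_sublist r out)⟩
      · intro a ha b hb
        rcases List.mem_cons.1 hb with rfl | hb
        · exact htk a ha
        · exact lt_trans (htk a ha) (hdp b hb)
  · -- v already present: r < len and out[r] = v
    push Not at hc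
    have hrlen : r < out.length := lt_of_le_of_ne hle hc.1
    have hv : v ∈ out := by
      rw [← hc.2, List.getD_eq_getElem _ _ hrlen]
      exact List.getElem_mem _
    exact ⟨fun y => by constructor <;> intro h <;> [exact Or.inr h; rcases h with rfl | h] <;>
      [exact hv; exact h], hs⟩

theorem pv_mem_add (v y : Int) (l : List Int) (hs : l.Pairwise (· < ·)) :
    y ∈ pvAdd v l ↔ y = v ∨ y ∈ l := (pv_add_spec v l hs).1 y

theorem pv_add_pairwise (v : Int) (l : List Int) (h : l.Pairwise (· < ·)) :
    (pvAdd v l).Pairwise (· < ·) := (pv_add_spec v l h).2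

-- fold invariant for B: strict sortedness and membership = acc ∪ pvContrib
theorem pv_B_fold (max_len : Int) (l : List Int) (prev : Int) (acc : List Int)
    (hs : acc.Pairwise (· < ·)) :
    ((l.foldl (fun (s : Int × List Int) b =>
        let out := if b - s.1 > max_len then pvAdd (PySem.Int.floordiv (s.1 + b) 2) s.2 else s.2
        (b, pvAdd b out)) (prev, acc)).2.Pairwise (· < ·)) ∧
    (∀ y, y ∈ (l.foldl (fun (s : Int × List Int) b =>
        let out := if b - s.1 > max_len then pvAdd (PySem.Int.floordiv (s.1 + b) 2) s.2 else s.2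
        (b, pvAdd b out)) (prev, acc)).2 ↔ y ∈ acc ∨ y ∈ pvContrib max_len prev l) := by
  induction l generalizing prev acc with
  | nil => simp [pvContrib, hs]
  | cons b rest ih =>
    simp only [List.foldl_cons, pvContrib]
    set out := if b - prev > max_len then pvAdd (PySem.Int.floordiv (prev + b) 2) acc else acc with hout
    have hout_pw : out.Pairwise (· < ·) := by
      rw [hout]; split_ifs
      · exact pv_add_pairwise _ _ hs
      · exact hs
    have hout_mem : ∀ y, y ∈ out ↔ y ∈ acc ∨ y ∈ (if b - prev > max_len then [PySem.Int.floordiv (prev + b) 2] else ([] : List Int)) := by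
      intro y; rw [hout]; split_ifs
      · rw [pv_mem_add _ _ _ hs]; simp; tauto
      · simp
    obtain ⟨hpw, hmem⟩ := ih b (pvAdd b out) (pv_add_pairwise _ _ hout_pw)
    refine ⟨hpw, fun y => ?_⟩
    rw [hmem y, pv_mem_add _ _ _ hout_pw, hout_mem y]
    simp only [List.mem_append, List.mem_cons]
    tauto

-- ===== VERDICT (by name: the statement is the Claim_ definition above) =====
theorem apply_max_phase_spec : Claim_equal_apply_max_phase := by
  intro indices total_frames max_len _
  unfold Spec_apply_max_phase apply_max_phase apply_max_phase_alt
  dsimp only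
  rw [pv_A_loop_eq indices (total_frames - 1) max_len]
  obtain ⟨hpw, hmem⟩ := pv_B_fold max_len indices 0 [] (by simp)
  apply PySem.List.sorted_eq_of_perm_of_pairwise_lt
  · rw [List.perm_ext_iff_of_nodup (hpw.imp ne_of_lt) (PySem.Set.nodup_ofList _)]
    intro y
    rw [hmem y, PySem.Set.mem_ofList]
    simp
  · exact hpw
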